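-- pv_equiv track=rewrite | github.com/Abhi-data-analyst/Python_Data_Analytics_Journey | Day13_L2.py | data_cotegry
-- ===== SOURCE A (Python) =====
-- def data_cotegry(test_data_200):
--     low=[]
--     medium=[]
--     high=[]
--     for x in test_data_200:
--       if x<50:
--         low.append(x)
--       if 50<=x<=100:
--         medium.append(x)
--       if x>100:
--         high.append(x)
--     return low , medium , high
-- ===== SOURCE B (Python) =====
-- def data_cotegry(test_data_200):
--     # Stable-sort by bucket index, then cut the sorted list at the bucket counts.
--     def bucket(x):
--         if x < 50:
--             return 0
--         if x <= 100:
--             return 1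
--         return 2
--     s = sorted(test_data_200, key=bucket)
--     n0 = sum(1 for x in test_data_200 if bucket(x) == 0)
--     n1 = sum(1 for x in test_data_200 if bucket(x) == 1)
--     return s[:n0], s[n0:n0 + n1], s[n0 + n1:]
-- ===== Notes on version B (the rewrite author's own statement) =====
-- stated objective: alternative
-- what changed: Instead of appending to three accumulators in one loop, B stably sorts the list by a 0/1/2 bucket key and slices the sorted list at the bucket counts; stability of Python's sort preserves the original order inside each bucket.
import Mathlib
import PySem

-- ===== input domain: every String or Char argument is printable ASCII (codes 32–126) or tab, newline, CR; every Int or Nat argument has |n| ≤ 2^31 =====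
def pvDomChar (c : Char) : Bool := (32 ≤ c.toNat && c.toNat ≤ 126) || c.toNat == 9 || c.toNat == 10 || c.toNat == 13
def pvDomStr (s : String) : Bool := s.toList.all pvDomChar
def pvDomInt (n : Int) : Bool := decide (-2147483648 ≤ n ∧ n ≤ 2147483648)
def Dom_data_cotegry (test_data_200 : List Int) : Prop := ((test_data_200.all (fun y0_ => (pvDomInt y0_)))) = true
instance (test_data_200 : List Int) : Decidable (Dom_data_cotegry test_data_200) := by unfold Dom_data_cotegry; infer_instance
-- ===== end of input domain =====

-- B replaces A's one-pass three-accumulator loop by a stable sort on a 0/1/2 bucket key followed by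
-- slicing the sorted list at the bucket counts; stability preserves the original order inside each bucket.

-- ===== PORT A =====
-- A: one pass, three accumulators appended to by independent if-branches.
def data_cotegry (test_data_200 : List Int) : List Int × List Int × List Int :=
  let st := test_data_200.foldl
    (fun (acc : List Int × List Int × List Int) x =>
      let acc := if x < 50 then (acc.1 ++ [x], acc.2.1, acc.2.2) else acc
      let acc := if 50 ≤ x ∧ x ≤ 100 then (acc.1, acc.2.1 ++ [x], acc.2.2) else acc
      let acc := if x > 100 then (acc.1, acc.2.1, acc.2.2 ++ [x]) else acc
      acc)
    ([], [], [])
  (st.1, st.2.1, st.2.2)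

-- ===== PORT B =====
-- B's helper bucket(x): 0 / 1 / 2.
def pvBucket (x : Int) : Int := if x < 50 then 0 else if x ≤ 100 then 1 else 2

-- B: stable sort by bucket key, count buckets 0 and 1, slice the sorted list.
def data_cotegry_alt (test_data_200 : List Int) : List Int × List Int × List Int :=
  let s := PySem.List.sorted test_data_200 pvBucket false
  let n0 : Int := test_data_200.foldl (fun a x => if pvBucket x == 0 then a + 1 else a) 0
  let n1 : Int := test_data_200.foldl (fun a x => if pvBucket x == 1 then a + 1 else a) 0
  (PySem.List.slice s none (some n0),
   PySem.List.slice s (some n0) (some (n0 + n1)),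
   PySem.List.slice s (some (n0 + n1)) none)

-- ===== PRECONDITION & SPEC =====
def Spec_data_cotegry (test_data_200 : List Int) (out : List Int × List Int × List Int) : Prop := out = data_cotegry_alt test_data_200
instance (test_data_200 : List Int) (out : List Int × List Int × List Int) : Decidable (Spec_data_cotegry test_data_200 out) := by unfold Spec_data_cotegry; infer_instance

-- ===== CLAIM (what is proved, stated in full; the proofs are below) =====
def Claim_equal_data_cotegry : Prop := ∀ (test_data_200 : List Int), Dom_data_cotegry test_data_200 → Spec_data_cotegry test_data_200 (data_cotegry test_data_200)

-- ===== LEMMAS AND PROOFS =====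

-- Loop invariant for A: folding from a partial state appends the three filters of the rest.
theorem data_cotegry_fold_inv (l : List Int) (a b c : List Int) :
    l.foldl
      (fun (acc : List Int × List Int × List Int) x =>
        let acc := if x < 50 then (acc.1 ++ [x], acc.2.1, acc.2.2) else acc
        let acc := if 50 ≤ x ∧ x ≤ 100 then (acc.1, acc.2.1 ++ [x], acc.2.2) else acc
        let acc := if x > 100 then (acc.1, acc.2.1, acc.2.2 ++ [x]) else acc
        acc)
      (a, b, c)
    = (a ++ l.filter (fun x => x < 50),
       b ++ l.filter (fun x => 50 ≤ x ∧ x ≤ 100),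
       c ++ l.filter (fun x => x > 100)) := by
  induction l generalizing a b c with
  | nil => simp
  | cons x xs ih =>
    simp only [List.foldl_cons, List.filter_cons]
    by_cases h1 : x < 50 <;> by_cases h2 : 50 ≤ x ∧ x ≤ 100 <;> by_cases h3 : x > 100 <;>
      simp [h1, h2, h3, ih]

-- insertBy skips a prefix it does not go before.
theorem insertBy_append_not_before {α : Type} (before : α → α → Bool) (x : α) (ys zs : List α)
    (h : ∀ y ∈ ys, before x y = false) :
    PySem.List.insertBy before x (ys ++ zs) = ys ++ PySem.List.insertBy before x zs := by
  induction ys with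
  | nil => simp
  | cons y t ih =>
    simp only [List.cons_append, PySem.List.insertBy, h y (by simp)]
    simp [ih (fun y hy => h y (by simp [hy]))]

-- insertBy goes in front of a list all of whose elements it goes before (incl. the empty list).
theorem insertBy_all_before {α : Type} (before : α → α → Bool) (x : α) (zs : List α)
    (h : ∀ y ∈ zs, before x y = true) :
    PySem.List.insertBy before x zs = x :: zs := by
  cases zs with
  | nil => simp [PySem.List.insertBy]
  | cons z t => simp [PySem.List.insertBy, h z (by simp)]

-- bucket values: the three predicates characterise the key.
theorem pvBucket_eq_zero (x : Int) : pvBucket x = 0 ↔ x < 50 := by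
  unfold pvBucket; split_ifs <;> omega
theorem pvBucket_eq_one (x : Int) : pvBucket x = 1 ↔ (50 ≤ x ∧ x ≤ 100) := by
  unfold pvBucket; split_ifs <;> omega
theorem pvBucket_eq_two (x : Int) : pvBucket x = 2 ↔ x > 100 := by
  unfold pvBucket; split_ifs <;> omega

-- insertBy appends at the end of a list none of whose elements it goes before.
theorem insertBy_all_not_before {α : Type} (before : α → α → Bool) (x : α) (zs : List α)
    (h : ∀ y ∈ zs, before x y = false) :
    PySem.List.insertBy before x zs = zs ++ [x] := by
  induction zs with
  | nil => simp [PySem.List.insertBy]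
  | cons z t ih =>
    simp only [PySem.List.insertBy, h z (by simp)]
    simp [ih (fun y hy => h y (by simp [hy]))]

-- The stable insertion sort by bucket produces exactly filter₀ ++ filter₁ ++ filter₂.
theorem sorted_bucket_eq (l : List Int) :
    PySem.List.sorted l pvBucket false
      = l.filter (fun x => x < 50) ++ l.filter (fun x => 50 ≤ x ∧ x ≤ 100)
          ++ l.filter (fun x => x > 100) := by
  rw [PySem.List.sorted_eq_foldl_insertBy]
  induction l using List.reverseRecOn with
  | nil => simp
  | append_singleton t x ih =>
    rw [List.foldl_append, List.foldl_cons, List.foldl_nil, ih]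
    simp only [List.filter_append, List.filter_cons, List.filter_nil]
    have key0 : ∀ y ∈ t.filter (fun x => x < 50), pvBucket y = 0 := fun y hy =>
      (pvBucket_eq_zero y).2 (by simpa using (List.mem_filter.1 hy).2)
    have key1 : ∀ y ∈ t.filter (fun x => 50 ≤ x ∧ x ≤ 100), pvBucket y = 1 := fun y hy =>
      (pvBucket_eq_one y).2 (by simpa using (List.mem_filter.1 hy).2)
    have key2 : ∀ y ∈ t.filter (fun x => x > 100), pvBucket y = 2 := fun y hy =>
      (pvBucket_eq_two y).2 (by simpa using (List.mem_filter.1 hy).2)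
    rcases lt_trichotomy (pvBucket x) 1 with h | h | h
    · -- bucket 0: skip filter₀, go in front of filter₁ ++ filter₂
      have hb : pvBucket x = 0 := by unfold pvBucket at h ⊢; split_ifs at h ⊢ <;> omega
      have hx : x < 50 := (pvBucket_eq_zero x).1 hb
      rw [List.append_assoc,
          insertBy_append_not_before _ _ _ _ (fun y hy => by simp [hb, key0 y hy]),
          insertBy_all_before _ _ _ (by
            intro y hy
            rcases List.mem_append.1 hy with hy | hy
            · simp [hb, key1 y hy]
            · simp [hb, key2 y hy])]
      simp [hx, show ¬ (50 ≤ x ∧ x ≤ 100) by omega, show ¬ (x > 100) by omega]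
    · -- bucket 1: skip filter₀ ++ filter₁, go in front of filter₂
      have hx : 50 ≤ x ∧ x ≤ 100 := (pvBucket_eq_one x).1 h
      rw [insertBy_append_not_before _ _ _ _ (by
            intro y hy
            rcases List.mem_append.1 hy with hy | hy
            · simp [h, key0 y hy]
            · simp [h, key1 y hy]),
          insertBy_all_before _ _ _ (fun y hy => by simp [h, key2 y hy])]
      simp [hx, show ¬ (x < 50) by omega, show ¬ (x > 100) by omega]
    · -- bucket 2: goes after everything
      have hb : pvBucket x = 2 := by unfold pvBucket at h ⊢; split_ifs at h ⊢ <;> omega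
      have hx : x > 100 := (pvBucket_eq_two x).1 hb
      rw [insertBy_all_not_before _ _ _ (by
            intro y hy
            rcases List.mem_append.1 hy with hy | hy
            · rcases List.mem_append.1 hy with hy | hy
              · simp [hb, key0 y hy]
              · simp [hb, key1 y hy]
            · simp [hb, key2 y hy])]
      simp [hx, show ¬ (x < 50) by omega, show ¬ (50 ≤ x ∧ x ≤ 100) by omega]

-- The counting folds are the filter lengths, and the bucket filters are A's filters.
theorem count_fold_eq (l : List Int) (k : Int) (a : Int) :
    l.foldl (fun a x => if pvBucket x == k then a + 1 else a) a
      = a + ((l.filter (fun x => pvBucket x == k)).length : Int) := by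
  induction l generalizing a with
  | nil => simp
  | cons x t ih =>
    rw [List.foldl_cons, ih, List.filter_cons]
    by_cases h : pvBucket x == k
    · simp [h]; ring
    · simp [h]

theorem filter_bucket0 (l : List Int) :
    l.filter (fun x => pvBucket x == 0) = l.filter (fun x => x < 50) := by
  apply List.filter_congr; intro y _
  unfold pvBucket; split_ifs <;> simp_all

theorem filter_bucket1 (l : List Int) :
    l.filter (fun x => pvBucket x == 1) = l.filter (fun x => 50 ≤ x ∧ x ≤ 100) := by
  apply List.filter_congr; intro y _
  unfold pvBucket; split_ifs <;> simp_all

-- ===== VERDICT (by name: the statement is the Claim_ definition above) =====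
theorem data_cotegry_spec : Claim_equal_data_cotegry := by
  intro l _
  show _ = _
  simp only [data_cotegry, data_cotegry_alt, data_cotegry_fold_inv, sorted_bucket_eq,
    count_fold_eq, filter_bucket0, filter_bucket1, List.nil_append, zero_add,
    Prod.mk.injEq]
  refine ⟨?_, ?_, ?_⟩
  · rw [PySem.List.slice_to_natCast]
    rw [List.append_assoc]
    exact List.take_left.symm
  · rw [PySem.List.slice_natCast_add]
    rw [List.append_assoc, List.drop_left]
    exact List.take_left.symm
  · rw [← Nat.cast_add, PySem.List.slice_from_natCast]
    rw [List.drop_left' (by simp)]
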